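-- pv_equiv track=rewrite | github.com/Gyu-Bin-Yoon/Baekjoon | 백준/Bronze/2798. 블랙잭/블랙잭.py | find_best_blackjack_sum
-- ===== SOURCE A (Python) =====
-- def find_best_blackjack_sum(N, M, cards):
--     best_sum = 0  # M을 넘지 않으면서 최대의 합을 저장할 변수
--
--     # 3중 루프를 통해 모든 카드의 조합을 확인
--     for i in range(N):
--         for j in range(i + 1, N):  # j는 i 다음 카드부터 시작
--             for k in range(j + 1, N):  # k는 j 다음 카드부터 시작
--                 current_sum = cards[i] + cards[j] + cards[k]
--
--                 # current_sum이 M을 넘지 않으면서 best_sum보다 크면 업데이트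
--                 if current_sum <= M and current_sum > best_sum:
--                     best_sum = current_sum
--
--     return best_sum
-- ===== SOURCE B (Python) =====
-- def find_best_blackjack_sum(N, M, cards):
--     xs = sorted(cards[:N] if N >= 0 else [])
--     n = len(xs)
--     best = 0
--     for i in range(n - 2):  # fix the smallest card of the triple
--         lo, hi = i + 1, n - 1
--         while lo < hi:  # two-pointer scan over the remaining sorted suffix
--             s = xs[i] + xs[lo] + xs[hi]
--             if s <= M:
--                 if s > best:
--                     best = s
--                 lo += 1
--             else:
--                 hi -= 1
--     return best
-- ===== Notes on version B (the rewrite author's own statement) =====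
-- stated objective: faster
-- what changed: B sorts the first N cards once and, for each fixed smallest card, finds the best completing pair with a two-pointer scan from both ends, replacing A's three nested index loops over all triples.
import Mathlib
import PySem

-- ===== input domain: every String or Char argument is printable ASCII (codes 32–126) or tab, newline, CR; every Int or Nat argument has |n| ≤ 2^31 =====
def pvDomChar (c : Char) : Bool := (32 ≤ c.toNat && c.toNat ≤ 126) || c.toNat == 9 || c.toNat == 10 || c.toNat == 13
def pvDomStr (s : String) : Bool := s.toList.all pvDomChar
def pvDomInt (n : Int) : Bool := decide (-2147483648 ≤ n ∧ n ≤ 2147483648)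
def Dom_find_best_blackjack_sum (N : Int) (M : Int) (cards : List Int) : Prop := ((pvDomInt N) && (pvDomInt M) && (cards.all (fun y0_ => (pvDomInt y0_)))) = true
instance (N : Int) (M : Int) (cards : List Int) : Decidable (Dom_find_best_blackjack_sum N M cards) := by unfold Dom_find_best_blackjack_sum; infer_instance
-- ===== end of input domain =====

-- B replaces A's O(N^3) triple loop by sort + fix-one-card + two-pointer scan (O(N^2), measurably faster);
-- proved equal to A on every input where A returns (Pre_ excludes exactly A's IndexError inputs).


-- ===== PORT A =====
-- cards[i] is ported as pyGetD cards i 0: under Pre_ every evaluated index lies in [0, len cards), where pyGetD is exact.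
def find_best_blackjack_sum (N : Int) (M : Int) (cards : List Int) : Int :=
  (PySem.List.pyRange 0 N 1).foldl (fun best1 i =>
    (PySem.List.pyRange (i + 1) N 1).foldl (fun best2 j =>
      (PySem.List.pyRange (j + 1) N 1).foldl (fun best3 k =>
        let s := PySem.List.pyGetD cards i 0 + PySem.List.pyGetD cards j 0 + PySem.List.pyGetD cards k 0
        if s ≤ M ∧ s > best3 then s else best3) best2) best1) 0

-- ===== PORT B =====
-- the while-loop of Source B; lo, hi are Source B's Python ints (always ≥ 0 here); xs[lo], xs[hi] are in range whenever read
def pvTwoPtr (xs : List Int) (M : Int) (ci : Int) (lo hi : Nat) (best : Int) : Int :=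
  if h : lo < hi then
    -- s = xs[i] + xs[lo] + xs[hi] of Source B, written out at each use (same value)
    if ci + xs.getD lo 0 + xs.getD hi 0 ≤ M then
      pvTwoPtr xs M ci (lo + 1) hi
        (if ci + xs.getD lo 0 + xs.getD hi 0 > best then ci + xs.getD lo 0 + xs.getD hi 0 else best)
    else pvTwoPtr xs M ci lo (hi - 1) best
  else best
termination_by hi - lo
decreasing_by all_goals omega

def find_best_blackjack_sum_alt (N : Int) (M : Int) (cards : List Int) : Int :=
  let xs := PySem.List.sorted (if 0 ≤ N then PySem.List.slice cards none (some N) else []) (fun x => x) false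
  let n := xs.length
  (PySem.List.pyRange 0 ((n : Int) - 2) 1).foldl (fun best i =>
    pvTwoPtr xs M (xs.getD i.toNat 0) (i.toNat + 1) (n - 1) best) 0

-- ===== PRECONDITION & SPEC =====
-- Pre_ excludes exactly the inputs where A raises IndexError (N ≥ 3 and N > len(cards)); A returns on everything else.
def Pre_find_best_blackjack_sum (N : Int) (M : Int) (cards : List Int) : Prop :=
  N ≤ (cards.length : Int) ∨ N < 3
instance (N : Int) (M : Int) (cards : List Int) : Decidable (Pre_find_best_blackjack_sum N M cards) := by
  unfold Pre_find_best_blackjack_sum; infer_instance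
def pvWitness_find_best_blackjack_sum : Int × Int × List Int := (3, 10, [5, 1, 7])

def Spec_find_best_blackjack_sum (N : Int) (M : Int) (cards : List Int) (out : Int) : Prop := out = find_best_blackjack_sum_alt N M cards
instance (N : Int) (M : Int) (cards : List Int) (out : Int) : Decidable (Spec_find_best_blackjack_sum N M cards out) := by unfold Spec_find_best_blackjack_sum; infer_instance

-- ===== CLAIM (what is proved, stated in full; the proofs are below) =====
def Claim_equal_find_best_blackjack_sum : Prop := ∀ (N : Int) (M : Int) (cards : List Int), Dom_find_best_blackjack_sum N M cards → Pre_find_best_blackjack_sum N M cards → Spec_find_best_blackjack_sum N M cards (find_best_blackjack_sum N M cards)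
-- ===== LEMMAS AND PROOFS =====

-- the "running best" update A performs on each candidate sum
def pvUpd (M b s : Int) : Int := if s ≤ M ∧ s > b then s else b
-- capped max fold: the max of b and all elements of l that are ≤ M
def pvF (M b : Int) (l : List Int) : Int := (l.filter (fun s => decide (s ≤ M))).foldl max b
-- all k-element combination sums of a list, in lexicographic choice order
def pvKS : List Int → Nat → List Int
  | _, 0 => [0]
  | [], _ + 1 => []
  | x :: t, k + 1 => (pvKS t k).map (fun s => x + s) ++ pvKS t (k + 1)

lemma pv_le_foldl_max : ∀ (f : List Int) (c : Int), c ≤ f.foldl max c := by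
  intro f
  induction f with
  | nil => intro c; simp
  | cons y t ih => intro c; exact le_trans (le_max_left c y) (ih (max c y))

lemma pv_mem_le_foldl_max : ∀ (f : List Int) (c x : Int), x ∈ f → x ≤ f.foldl max c := by
  intro f
  induction f with
  | nil => intro c x h; cases h
  | cons y t ih =>
    intro c x h
    rcases List.mem_cons.mp h with rfl | h
    · exact le_trans (le_max_right c x) (pv_le_foldl_max t _)
    · exact ih _ x h

lemma pv_foldl_max_le : ∀ (f : List Int) (c s : Int), c ≤ s → (∀ x ∈ f, x ≤ s) → f.foldl max c ≤ s := by
  intro f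
  induction f with
  | nil => intro c s h _; simpa using h
  | cons y t ih =>
    intro c s h hall
    exact ih _ s (max_le h (hall y (by simp))) (fun x hx => hall x (List.mem_cons_of_mem _ hx))

lemma pvF_max (M b s : Int) (l : List Int) (hs : s ≤ M) (hmem : s ∈ l) (hle : ∀ x ∈ l, x ≤ s) :
    pvF M b l = max b s := by
  unfold pvF
  have hsf : s ∈ l.filter (fun s => decide (s ≤ M)) := List.mem_filter.mpr ⟨hmem, by simpa using hs⟩
  apply le_antisymm
  · exact pv_foldl_max_le _ b (max b s) (le_max_left b s)
      (fun x hx => le_trans (hle x (List.mem_filter.mp hx).1) (le_max_right b s))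
  · exact max_le (pv_le_foldl_max _ b) (pv_mem_le_foldl_max _ b s hsf)

lemma pvKS_zero (t : List Int) : pvKS t 0 = [0] := by cases t <;> rfl

lemma pvKS_one : ∀ t : List Int, pvKS t 1 = t := by
  intro t; induction t with
  | nil => rfl
  | cons x t ih =>
    show (pvKS t 0).map _ ++ pvKS t 1 = _
    rw [ih, pvKS_zero]; simp

lemma pvKS_short : ∀ (t : List Int) (k : Nat), t.length < k → pvKS t k = [] := by
  intro t
  induction t with
  | nil => intro k h; cases k with
    | zero => omega
    | succ k => rfl
  | cons x t ih =>
    intro k h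
    cases k with
    | zero => omega
    | succ k =>
      show (pvKS t k).map _ ++ pvKS t (k+1) = []
      simp only [List.length_cons] at h
      rw [ih k (by omega), ih (k+1) (by omega)]
      rfl

lemma pvFold_upd (M : Int) : ∀ (l : List Int) (b : Int), l.foldl (pvUpd M) b = pvF M b l := by
  intro l
  induction l with
  | nil => intro b; simp [pvF]
  | cons x t ih =>
    intro b
    by_cases hx : x ≤ M
    · have hupd : pvUpd M b x = max b x := by
        unfold pvUpd; by_cases h2 : x > b <;> simp [hx, h2] <;> omega
      simp only [pvF, List.foldl_cons, List.filter_cons, hx, decide_true, if_true]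
      rw [hupd, ih]; rfl
    · have hupd : pvUpd M b x = b := by unfold pvUpd; simp [hx]
      simp only [pvF, List.foldl_cons, List.filter_cons, hx, decide_false]
      rw [hupd, ih]; rfl

lemma pvF_append (M b : Int) (l1 l2 : List Int) : pvF M b (l1 ++ l2) = pvF M (pvF M b l1) l2 := by
  simp [pvF, List.filter_append, List.foldl_append]

lemma pvF_gt (M b : Int) (l : List Int) (h : ∀ x ∈ l, M < x) : pvF M b l = b := by
  have : l.filter (fun s => decide (s ≤ M)) = [] := by
    rw [List.filter_eq_nil_iff]; intro a ha; simpa using not_le.mpr (h a ha)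
  simp [pvF, this]

lemma pvF_perm (M b : Int) (l1 l2 : List Int) (h : l1.Perm l2) : pvF M b l1 = pvF M b l2 := by
  unfold pvF
  have key : ∀ (f1 f2 : List Int) (c : Int), (∀ x ∈ f1, x ∈ f2) → (∀ x ∈ f2, x ∈ f1) →
      f1.foldl max c ≤ f2.foldl max c := by
    intro f1 f2 c h12 _
    exact pv_foldl_max_le f1 c _ (pv_le_foldl_max f2 c)
      (fun x hx => pv_mem_le_foldl_max f2 c x (h12 x hx))
  have m1 : ∀ x ∈ l1.filter (fun s => decide (s ≤ M)), x ∈ l2.filter (fun s => decide (s ≤ M)) := by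
    intro x hx; rcases List.mem_filter.mp hx with ⟨h1, h2⟩
    exact List.mem_filter.mpr ⟨h.mem_iff.mp h1, h2⟩
  have m2 : ∀ x ∈ l2.filter (fun s => decide (s ≤ M)), x ∈ l1.filter (fun s => decide (s ≤ M)) := by
    intro x hx; rcases List.mem_filter.mp hx with ⟨h1, h2⟩
    exact List.mem_filter.mpr ⟨h.mem_iff.mpr h1, h2⟩
  exact le_antisymm (key _ _ b m1 m2) (key _ _ b m2 m1)

lemma pvKS_perm : ∀ (t1 t2 : List Int), t1.Perm t2 → ∀ (k : Nat), (pvKS t1 k).Perm (pvKS t2 k) := by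
  intro t1 t2 h
  induction h with
  | nil => intro k; exact List.Perm.refl _
  | cons x h ih =>
    intro k
    cases k with
    | zero => simp [pvKS_zero]
    | succ k =>
      show ((pvKS _ k).map _ ++ pvKS _ (k+1)).Perm ((pvKS _ k).map _ ++ pvKS _ (k+1))
      exact ((ih k).map _).append (ih (k+1))
  | swap x y t =>
    intro k
    cases k with
    | zero => simp [pvKS_zero]
    | succ k =>
      cases k with
      | zero =>
        rw [pvKS_one, pvKS_one]
        exact List.Perm.swap x y t
      | succ k' =>
        show ((pvKS (x :: t) (k'+1)).map (fun s => y + s) ++ pvKS (x :: t) (k'+1+1)).Perm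
             ((pvKS (y :: t) (k'+1)).map (fun s => x + s) ++ pvKS (y :: t) (k'+1+1))
        show ((((pvKS t k').map (fun s => x + s) ++ pvKS t (k'+1)).map (fun s => y + s)) ++
              ((pvKS t (k'+1)).map (fun s => x + s) ++ pvKS t (k'+1+1))).Perm
             ((((pvKS t k').map (fun s => y + s) ++ pvKS t (k'+1)).map (fun s => x + s)) ++
              ((pvKS t (k'+1)).map (fun s => y + s) ++ pvKS t (k'+1+1)))
        rw [List.map_append, List.map_append, List.map_map, List.map_map]
        have hcomm : ((fun s => y + s) ∘ (fun s => x + s)) = ((fun s => x + s) ∘ (fun s => y + s)) := by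
          funext s; simp [Function.comp]; ring
        rw [hcomm]
        rw [List.perm_iff_count]
        intro a
        simp only [List.count_append]
        omega
  | trans h1 h2 ih1 ih2 => intro k; exact (ih1 k).trans (ih2 k)

lemma pv_perm_middle (A B C D : List Int) : (A ++ B ++ (C ++ D)).Perm (A ++ C ++ (B ++ D)) := by
  rw [List.perm_iff_count]; intro a; simp only [List.count_append]; omega

lemma pvKS_cons (x : Int) (t : List Int) (k : Nat) :
    pvKS (x :: t) (k + 1) = (pvKS t k).map (fun s => x + s) ++ pvKS t (k + 1) := rfl

lemma pvKS_cons2 (x : Int) (t : List Int) :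
    pvKS (x :: t) 2 = t.map (fun s => x + s) ++ pvKS t 2 := by
  rw [pvKS_cons, pvKS_one]


lemma pvKS_snoc : ∀ (t : List Int) (k : Nat) (z : Int),
    (pvKS (t ++ [z]) (k + 1)).Perm (pvKS t (k + 1) ++ (pvKS t k).map (fun s => s + z)) := by
  intro t
  induction t with
  | nil =>
    intro k z
    cases k with
    | zero =>
      simp only [List.nil_append]
      rw [pvKS_one, pvKS_one, pvKS_zero]
      simp
    | succ k =>
      simp only [List.nil_append]
      rw [pvKS_cons]
      simp [show pvKS ([] : List Int) (k + 1) = [] from rfl,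
            show pvKS ([] : List Int) (k + 1 + 1) = [] from rfl]
  | cons x t' ih =>
    intro k z
    have hstep : ((x :: t') ++ [z]) = x :: (t' ++ [z]) := by simp
    rw [hstep, pvKS_cons]
    cases k with
    | zero =>
      rw [pvKS_zero, pvKS_one, pvKS_one, pvKS_zero]
      simp
    | succ k =>
      have h1 := (ih k z).map (fun s => x + s)
      have h2 := ih (k + 1) z
      refine (h1.append h2).trans ?_
      rw [List.map_append]
      rw [pvKS_cons x t' (k + 1), pvKS_cons x t' k, List.map_append]
      have hcomm : ((pvKS t' k).map (fun s => x + s)).map (fun s => s + z)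
          = ((pvKS t' k).map (fun s => s + z)).map (fun s => x + s) := by
        rw [List.map_map, List.map_map]
        apply List.map_congr_left
        intro a _
        simp only [Function.comp_apply]
        ring
      rw [hcomm]
      exact pv_perm_middle ((pvKS t' (k + 1)).map (fun s => x + s))
        (((pvKS t' k).map (fun s => s + z)).map (fun s => x + s))
        (pvKS t' (k + 1 + 1)) ((pvKS t' (k + 1)).map (fun s => s + z))

lemma pv_foldl_fix {α β : Type} (l : List β) (f : α → β → α) :
    ∀ (b : α), (∀ (c : α) (x : β), x ∈ l → f c x = c) → l.foldl f b = b := by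
  induction l with
  | nil => intro b _; rfl
  | cons y t ih =>
    intro b h
    rw [List.foldl_cons, h b y (by simp)]
    exact ih b (fun c x hx => h c x (List.mem_cons_of_mem y hx))

lemma pv_inner_fold (M : Int) (c : Int) (l : List Int) (f : Int → Int) :
    l.foldl (fun b3 k => pvUpd M b3 (f k)) c = pvF M c (l.map f) := by
  rw [← pvFold_upd M (l.map f) c, List.foldl_map]

-- ===== A-side: the triple loop computes the capped max over all 3-combination sums of cards[:N] =====

lemma pvA_map (N : Int) (cards : List Int) (hN0 : 0 ≤ N) (hNl : N ≤ (cards.length : Int)) :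
    ∀ (a : Int), 0 ≤ a →
      (PySem.List.pyRange a N 1).map (fun k => PySem.List.pyGetD cards k 0)
        = (cards.take N.toNat).drop a.toNat := by
  intro a ha
  have hlen : (((cards.take N.toNat).length : Nat) : Int) = N := by
    simp [List.length_take]; omega
  have hcongr : (PySem.List.pyRange a N 1).map (fun k => PySem.List.pyGetD cards k 0)
      = (PySem.List.pyRange a N 1).map (fun k => PySem.List.pyGetD (cards.take N.toNat) k 0) := by
    apply List.map_congr_left
    intro k hk
    have hk' := (PySem.List.mem_pyRange_one).mp hk
    have h0k : 0 ≤ k := le_trans ha hk'.1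
    have hkN : k < N := hk'.2
    rw [PySem.List.pyGetD_eq_getElem cards 0 h0k (by omega),
        PySem.List.pyGetD_eq_getElem (cards.take N.toNat) 0 h0k (by rw [hlen]; exact hkN)]
    simp [List.getElem_take]
  rw [hcongr]
  have h2 := PySem.List.map_pyGetD_pyRange' (cards.take N.toNat) 0 ha
  rw [hlen] at h2
  exact h2

lemma pvA_cons (N : Int) (cards : List Int) (hN0 : 0 ≤ N) (hNl : N ≤ (cards.length : Int))
    (a : Int) (ha : 0 ≤ a) (haN : a < N) :
    (cards.take N.toNat).drop a.toNat
      = PySem.List.pyGetD cards a 0 :: (cards.take N.toNat).drop (a.toNat + 1) := by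
  have hlt : a.toNat < (cards.take N.toNat).length := by simp [List.length_take]; omega
  rw [List.drop_eq_getElem_cons hlt]
  congr 1
  rw [PySem.List.pyGetD_eq_getElem cards 0 ha (by omega)]
  simp [List.getElem_take]

lemma pvA_pairs (M N : Int) (cards : List Int) (hN0 : 0 ≤ N) (hNl : N ≤ (cards.length : Int)) (ci : Int) :
    ∀ (d : Nat) (a b : Int), 0 ≤ a → (N - a).toNat = d →
      (PySem.List.pyRange a N 1).foldl
        (fun b2 j => (PySem.List.pyRange (j + 1) N 1).foldl
          (fun b3 k => pvUpd M b3 (ci + PySem.List.pyGetD cards j 0 + PySem.List.pyGetD cards k 0)) b2) b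
      = pvF M b ((pvKS ((cards.take N.toNat).drop a.toNat) 2).map (fun y => ci + y)) := by
  intro d
  induction d with
  | zero =>
    intro a b ha hd
    rw [PySem.List.pyRange_one_eq_nil (show N ≤ a from by omega)]
    have hdrop : (cards.take N.toNat).drop a.toNat = [] := by
      rw [List.drop_eq_nil_iff]
      simp [List.length_take]; omega
    rw [hdrop, show pvKS ([] : List Int) 2 = [] from rfl]
    simp [pvF]
  | succ d ih =>
    intro a b ha hd
    have haN : a < N := by omega
    rw [PySem.List.pyRange_one_cons haN, List.foldl_cons, pv_inner_fold M]
    have htoNat : (a + 1).toNat = a.toNat + 1 := by omega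
    have hmapg := pvA_map N cards hN0 hNl (a + 1) (by omega)
    rw [htoNat] at hmapg
    have hmap : (PySem.List.pyRange (a + 1) N 1).map
          (fun k => ci + PySem.List.pyGetD cards a 0 + PySem.List.pyGetD cards k 0)
        = ((cards.take N.toNat).drop (a.toNat + 1)).map
            (fun y => ci + PySem.List.pyGetD cards a 0 + y) := by
      rw [show (fun k => ci + PySem.List.pyGetD cards a 0 + PySem.List.pyGetD cards k 0)
            = ((fun y => ci + PySem.List.pyGetD cards a 0 + y) ∘ (fun k => PySem.List.pyGetD cards k 0))
          from rfl]
      rw [← List.map_map, hmapg]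
    rw [hmap]
    rw [pvA_cons N cards hN0 hNl a ha haN, pvKS_cons2, List.map_append, pvF_append]
    have hblk : ((((cards.take N.toNat).drop (a.toNat + 1)).map
            (fun s => PySem.List.pyGetD cards a 0 + s)).map (fun y => ci + y))
        = ((cards.take N.toNat).drop (a.toNat + 1)).map
            (fun y => ci + PySem.List.pyGetD cards a 0 + y) := by
      rw [List.map_map]
      apply List.map_congr_left
      intro s _
      simp only [Function.comp_apply]
      ring
    rw [hblk]
    have ihh := ih (a + 1) (pvF M b (((cards.take N.toNat).drop (a.toNat + 1)).map
      (fun y => ci + PySem.List.pyGetD cards a 0 + y))) (by omega) (by omega)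
    rw [htoNat] at ihh
    exact ihh

lemma pvA_top (M N : Int) (cards : List Int) (hN0 : 0 ≤ N) (hNl : N ≤ (cards.length : Int)) :
    ∀ (d : Nat) (a b : Int), 0 ≤ a → (N - a).toNat = d →
      (PySem.List.pyRange a N 1).foldl
        (fun b1 i => (PySem.List.pyRange (i + 1) N 1).foldl
          (fun b2 j => (PySem.List.pyRange (j + 1) N 1).foldl
            (fun b3 k => pvUpd M b3 (PySem.List.pyGetD cards i 0 + PySem.List.pyGetD cards j 0 + PySem.List.pyGetD cards k 0)) b2) b1) b
      = pvF M b (pvKS ((cards.take N.toNat).drop a.toNat) 3) := by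
  intro d
  induction d with
  | zero =>
    intro a b ha hd
    rw [PySem.List.pyRange_one_eq_nil (show N ≤ a from by omega)]
    have hdrop : (cards.take N.toNat).drop a.toNat = [] := by
      rw [List.drop_eq_nil_iff]
      simp [List.length_take]; omega
    rw [hdrop, show pvKS ([] : List Int) 3 = [] from rfl]
    simp [pvF]
  | succ d ih =>
    intro a b ha hd
    have haN : a < N := by omega
    rw [PySem.List.pyRange_one_cons haN, List.foldl_cons]
    rw [pvA_pairs M N cards hN0 hNl (PySem.List.pyGetD cards a 0) (N - (a + 1)).toNat (a + 1) b (by omega) rfl]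
    have htoNat : (a + 1).toNat = a.toNat + 1 := by omega
    rw [htoNat]
    rw [pvA_cons N cards hN0 hNl a ha haN, pvKS_cons, pvF_append]
    have ihh := ih (a + 1) (pvF M b (((pvKS ((cards.take N.toNat).drop (a.toNat + 1)) 2)).map
      (fun y => PySem.List.pyGetD cards a 0 + y))) (by omega) (by omega)
    rw [htoNat] at ihh
    exact ihh

lemma pvA_char (N M : Int) (cards : List Int) (hN0 : 0 ≤ N) (hNl : N ≤ (cards.length : Int)) :
    find_best_blackjack_sum N M cards = pvF M 0 (pvKS (cards.take N.toNat) 3) := by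
  have h := pvA_top M N cards hN0 hNl (N - 0).toNat 0 0 le_rfl rfl
  simp only [Int.toNat_zero, List.drop_zero] at h
  unfold find_best_blackjack_sum
  exact h

lemma pvA_small (N M : Int) (cards : List Int) (hN3 : N < 3) :
    find_best_blackjack_sum N M cards = 0 := by
  unfold find_best_blackjack_sum
  apply pv_foldl_fix
  intro c i hi
  have hi' := (PySem.List.mem_pyRange_one).mp hi
  apply pv_foldl_fix
  intro c2 j hj
  have hj' := (PySem.List.mem_pyRange_one).mp hj
  rw [PySem.List.pyRange_one_eq_nil (show N ≤ j + 1 from by omega)]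
  rfl

-- ===== B-side: sorted-list getD facts and segment membership =====

lemma pv_sorted_getD_mono (ys : List Int) (p q : Nat) (hpq : p ≤ q)
    (hq : q < (PySem.List.sorted ys (fun x => x) false).length) :
    (PySem.List.sorted ys (fun x => x) false).getD p 0
      ≤ (PySem.List.sorted ys (fun x => x) false).getD q 0 := by
  rw [List.getD_eq_getElem _ 0 (by omega), List.getD_eq_getElem _ 0 hq]
  exact PySem.List.sorted_id_getElem_mono ys hpq hq

lemma pv_mem_seg (xs : List Int) (lo m j : Nat) (h1 : lo ≤ j) (h2 : j < lo + m) (h3 : j < xs.length) :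
    xs.getD j 0 ∈ (xs.drop lo).take m := by
  rw [List.getD_eq_getElem xs 0 h3]
  apply List.mem_iff_getElem.mpr
  refine ⟨j - lo, by simp [List.length_take, List.length_drop]; omega, ?_⟩
  rw [List.getElem_take, List.getElem_drop]
  congr 1
  omega

lemma pv_seg_mem (xs : List Int) (lo m : Nat) (y : Int) (hy : y ∈ (xs.drop lo).take m) :
    ∃ j, lo ≤ j ∧ j < lo + m ∧ j < xs.length ∧ y = xs.getD j 0 := by
  rcases List.mem_iff_getElem.mp hy with ⟨i, hlen, hval⟩
  have hlen' : i < m ∧ lo + i < xs.length := by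
    simp [List.length_take, List.length_drop] at hlen; omega
  refine ⟨lo + i, by omega, by omega, hlen'.2, ?_⟩
  rw [List.getD_eq_getElem xs 0 hlen'.2, ← hval, List.getElem_take, List.getElem_drop]

lemma pv_max_if (b s : Int) : (if s > b then s else b) = max b s := by
  by_cases h : s > b <;> simp [h] <;> omega

-- ===== B-side: the two-pointer scan computes the capped max over all pair sums of the segment =====

lemma pvTwoPtr_spec (M ci : Int) (ys : List Int) :
    ∀ (d lo hi : Nat) (best : Int), hi - lo = d →
      hi < (PySem.List.sorted ys (fun x => x) false).length →
      pvTwoPtr (PySem.List.sorted ys (fun x => x) false) M ci lo hi best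
        = pvF M best ((pvKS (((PySem.List.sorted ys (fun x => x) false).drop lo).take (hi + 1 - lo)) 2).map (fun y => ci + y)) := by
  intro d
  induction d with
  | zero =>
    intro lo hi best hd hhi
    rw [pvTwoPtr, dif_neg (show ¬ lo < hi from by omega)]
    rw [pvKS_short _ 2 (by simp [List.length_take, List.length_drop]; omega)]
    simp [pvF]
  | succ d ih =>
    intro lo hi best hd hhi
    set xs := PySem.List.sorted ys (fun x => x) false with hxs
    have hlohi : lo < hi := by omega
    rw [pvTwoPtr, dif_pos hlohi]
    by_cases hs : ci + xs.getD lo 0 + xs.getD hi 0 ≤ M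
    · rw [if_pos hs]
      have hcons : (xs.drop lo).take (hi + 1 - lo)
          = xs.getD lo 0 :: ((xs.drop (lo + 1)).take (hi + 1 - (lo + 1))) := by
        rw [show hi + 1 - lo = (hi + 1 - (lo + 1)) + 1 from by omega]
        rw [List.drop_eq_getElem_cons (show lo < xs.length from by omega), List.take_succ_cons]
        rw [List.getD_eq_getElem xs 0 (show lo < xs.length from by omega)]
      rw [hcons, pvKS_cons, pvKS_one, List.map_append, pvF_append]
      have hfirst : pvF M best ((((xs.drop (lo + 1)).take (hi + 1 - (lo + 1))).map
            (fun s => xs.getD lo 0 + s)).map (fun y => ci + y))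
          = max best (ci + xs.getD lo 0 + xs.getD hi 0) := by
        rw [List.map_map]
        apply pvF_max M best _ _ hs
        · have hmem := pv_mem_seg xs (lo + 1) (hi + 1 - (lo + 1)) hi (by omega) (by omega) hhi
          have hval : ((fun y => ci + y) ∘ (fun s => xs.getD lo 0 + s)) (xs.getD hi 0)
              = ci + xs.getD lo 0 + xs.getD hi 0 := by
            simp only [Function.comp_apply]; ring
          rw [← hval]
          exact List.mem_map_of_mem hmem
        · intro x hx
          rcases List.mem_map.mp hx with ⟨y, hy, rfl⟩
          rcases pv_seg_mem xs (lo + 1) _ y hy with ⟨j, hj1, hj2, hj3, rfl⟩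
          have hmono : xs.getD j 0 ≤ xs.getD hi 0 := pv_sorted_getD_mono ys j hi (by omega) hhi
          simp only [Function.comp_apply]
          omega
      rw [hfirst, pv_max_if]
      exact ih (lo + 1) hi _ (by omega) hhi
    · rw [if_neg hs]
      have hsnoc : (xs.drop lo).take (hi + 1 - lo)
          = ((xs.drop lo).take (hi - lo)) ++ [xs.getD hi 0] := by
        rw [show hi + 1 - lo = (hi - lo) + 1 from by omega, List.take_add_one]
        congr 1
        rw [List.getElem?_eq_getElem (show hi - lo < (xs.drop lo).length from by
          simp [List.length_drop]; omega)]
        rw [List.getElem_drop, List.getD_eq_getElem xs 0 hhi]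
        have hidx : lo + (hi - lo) = hi := by omega
        simp [hidx]
      rw [hsnoc]
      have hperm := (pvKS_snoc ((xs.drop lo).take (hi - lo)) 1 (xs.getD hi 0)).map (fun y => ci + y)
      rw [pvF_perm M best _ _ hperm, pvKS_one, List.map_append, pvF_append]
      have hgt : pvF M (pvF M best ((pvKS ((xs.drop lo).take (hi - lo)) 2).map (fun y => ci + y)))
            ((((xs.drop lo).take (hi - lo)).map (fun s => s + xs.getD hi 0)).map (fun y => ci + y))
          = pvF M best ((pvKS ((xs.drop lo).take (hi - lo)) 2).map (fun y => ci + y)) := by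
        apply pvF_gt
        intro x hx
        rcases List.mem_map.mp hx with ⟨w, hw, rfl⟩
        rcases List.mem_map.mp hw with ⟨y, hy, rfl⟩
        rcases pv_seg_mem xs lo _ y hy with ⟨j, hj1, hj2, hj3, rfl⟩
        have hmono : xs.getD lo 0 ≤ xs.getD j 0 := pv_sorted_getD_mono ys lo j hj1 hj3
        omega
      rw [hgt]
      have ihh := ih lo (hi - 1) best (by omega) (by omega)
      rw [show hi - 1 + 1 - lo = hi - lo from by omega] at ihh
      exact ihh

lemma pvB_fold (M : Int) (ys : List Int) :
    ∀ (d : Nat) (a b : Int), 0 ≤ a →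
      ((((PySem.List.sorted ys (fun x => x) false).length : Int) - 2) - a).toNat = d →
      (PySem.List.pyRange a (((PySem.List.sorted ys (fun x => x) false).length : Int) - 2) 1).foldl
        (fun best i => pvTwoPtr (PySem.List.sorted ys (fun x => x) false) M
          ((PySem.List.sorted ys (fun x => x) false).getD i.toNat 0) (i.toNat + 1)
          ((PySem.List.sorted ys (fun x => x) false).length - 1) best) b
      = pvF M b (pvKS ((PySem.List.sorted ys (fun x => x) false).drop a.toNat) 3) := by
  intro d
  induction d with
  | zero =>
    intro a b ha hd
    rw [PySem.List.pyRange_one_eq_nil (by omega)]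
    rw [pvKS_short _ 3 (by simp only [List.length_drop]; omega)]
    simp [pvF]
  | succ d ih =>
    intro a b ha hd
    set xs := PySem.List.sorted ys (fun x => x) false with hxs
    have hL : xs.length = (PySem.List.sorted ys (fun x => x) false).length := by rw [hxs]
    have haN : a < (xs.length : Int) - 2 := by omega
    rw [PySem.List.pyRange_one_cons haN, List.foldl_cons]
    have hspec := pvTwoPtr_spec M (xs.getD a.toNat 0) ys
      ((xs.length - 1) - (a.toNat + 1)) (a.toNat + 1) (xs.length - 1) b rfl (by omega)
    rw [← hxs] at hspec
    have htake : ((xs.drop (a.toNat + 1)).take (xs.length - 1 + 1 - (a.toNat + 1)))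
        = xs.drop (a.toNat + 1) := by
      apply List.take_of_length_le
      simp [List.length_drop]; omega
    rw [htake] at hspec
    rw [hspec]
    have hcons : xs.drop a.toNat = xs.getD a.toNat 0 :: xs.drop (a.toNat + 1) := by
      rw [List.drop_eq_getElem_cons (show a.toNat < xs.length from by omega),
          List.getD_eq_getElem xs 0 (show a.toNat < xs.length from by omega)]
    rw [hcons, pvKS_cons, pvF_append]
    have htn : (a + 1).toNat = a.toNat + 1 := by omega
    have ihh := ih (a + 1) (pvF M b ((pvKS (xs.drop (a.toNat + 1)) 2).map
      (fun y => xs.getD a.toNat 0 + y))) (by omega) (by omega)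
    rw [htn] at ihh
    exact ihh

lemma pvB_char (N M : Int) (cards : List Int) :
    find_best_blackjack_sum_alt N M cards
      = pvF M 0 (pvKS (PySem.List.sorted (if 0 ≤ N then PySem.List.slice cards none (some N) else []) (fun x => x) false) 3) := by
  have h := pvB_fold M (if 0 ≤ N then PySem.List.slice cards none (some N) else []) _ 0 0 le_rfl rfl
  simp only [Int.toNat_zero, List.drop_zero] at h
  unfold find_best_blackjack_sum_alt
  exact h

-- ===== VERDICT (by name: the statement is the Claim_ definition above) =====
theorem find_best_blackjack_sum_spec : Claim_equal_find_best_blackjack_sum := by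
  intro N M cards hDom hPre
  unfold Spec_find_best_blackjack_sum
  rw [pvB_char]
  by_cases hN3 : N < 3
  · rw [pvA_small N M cards hN3]
    have hlen : (PySem.List.sorted (if 0 ≤ N then PySem.List.slice cards none (some N) else []) (fun x => x) false).length < 3 := by
      by_cases h0 : 0 ≤ N
      · rw [if_pos h0, PySem.List.length_sorted, PySem.List.slice_to cards h0]
        simp [List.length_take]; omega
      · rw [if_neg h0, PySem.List.length_sorted]
        simp
    rw [pvKS_short _ 3 hlen]
    simp [pvF]
  · have hN0 : 0 ≤ N := by omega
    have hNl : N ≤ (cards.length : Int) := by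
      unfold Pre_find_best_blackjack_sum at hPre
      rcases hPre with h | h
      · exact h
      · omega
    rw [pvA_char N M cards hN0 hNl]
    rw [if_pos hN0, PySem.List.slice_to cards hN0]
    exact pvF_perm M 0 _ _ (pvKS_perm _ _ (PySem.List.sorted_perm _ _ _).symm 3)
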